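-- pv_equiv track=rewrite | github.com/amsword/qdv | scripts/qd_util.py | cartesian_list
-- ===== SOURCE A (Python) =====
-- def cartesian_list(select_atom, negation):
--     result = []
--     for r1 in select_atom:
--         for r2 in negation:
--             if any(a == False and b == True for a , b in zip(r1, r2)):
--                 continue
--             result.append((r1, r2))
--     return result
-- ===== SOURCE B (Python) =====
-- def _mask(bits):
--     m = 0
--     for b in reversed(bits):
--         m = 2 * m + (1 if b else 0)
--     return m
--
-- def cartesian_list(select_atom, negation):
--     neg_masks = [(r2, _mask(r2)) for r2 in negation]
--     result = []
--     for r1 in select_atom: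
--         nm1 = _mask([not a for a in r1])
--         for r2, m2 in neg_masks:
--             if m2 & nm1 == 0:
--                 result.append((r1, r2))
--     return result
-- ===== Notes on version B (the rewrite author's own statement) =====
-- stated objective: faster
-- what changed: B precomputes an integer bitmask per row once, so each pair is tested with a single bitwise AND instead of a per-position scan of the zipped rows.
import Mathlib
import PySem

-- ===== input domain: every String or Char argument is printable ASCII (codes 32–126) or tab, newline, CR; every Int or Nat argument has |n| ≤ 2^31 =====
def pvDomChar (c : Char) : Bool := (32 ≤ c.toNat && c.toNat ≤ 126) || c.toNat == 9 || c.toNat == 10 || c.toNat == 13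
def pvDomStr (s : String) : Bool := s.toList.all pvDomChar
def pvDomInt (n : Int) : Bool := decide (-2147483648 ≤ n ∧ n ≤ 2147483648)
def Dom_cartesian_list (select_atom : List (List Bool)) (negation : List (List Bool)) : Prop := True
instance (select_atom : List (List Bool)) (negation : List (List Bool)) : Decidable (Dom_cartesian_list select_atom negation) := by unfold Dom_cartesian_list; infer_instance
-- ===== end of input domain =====

-- B precomputes one integer bitmask per row so each pair test is a single bitwise AND (constant-factor speed-up); return values are identical.

-- ===== PORT A =====
def cartesian_list (select_atom : List (List Bool)) (negation : List (List Bool)) : List (List Bool × List Bool) :=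
  select_atom.foldl (fun result r1 =>
    negation.foldl (fun result r2 =>
      if (r1.zip r2).any (fun p => p.1 == false && p.2 == true) then result
      else result ++ [(r1, r2)]) result) []

-- ===== PORT B =====
-- mask of a Bool row: bit i is set iff element i is true (Source B's _mask, a loop over the reversed list)
def pvMask (bits : List Bool) : Nat :=
  bits.reverse.foldl (fun m b => 2 * m + (if b then 1 else 0)) 0

def cartesian_list_alt (select_atom : List (List Bool)) (negation : List (List Bool)) : List (List Bool × List Bool) :=
  let negMasks := negation.map (fun r2 => (r2, pvMask r2))
  select_atom.foldl (fun result r1 =>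
    let nm1 := pvMask (r1.map (fun a => !a))
    negMasks.foldl (fun result p =>
      if p.2 &&& nm1 == 0 then result ++ [(r1, p.1)] else result) result) []

-- ===== PRECONDITION & SPEC =====
def Spec_cartesian_list (select_atom : List (List Bool)) (negation : List (List Bool)) (out : List (List Bool × List Bool)) : Prop := out = cartesian_list_alt select_atom negation
instance (select_atom : List (List Bool)) (negation : List (List Bool)) (out : List (List Bool × List Bool)) : Decidable (Spec_cartesian_list select_atom negation out) := by unfold Spec_cartesian_list; infer_instance

-- ===== CLAIM (what is proved, stated in full; the proofs are below) =====
def Claim_equal_cartesian_list : Prop := ∀ (select_atom : List (List Bool)) (negation : List (List Bool)), Dom_cartesian_list select_atom negation → Spec_cartesian_list select_atom negation (cartesian_list select_atom negation)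

-- ===== LEMMAS AND PROOFS =====

theorem pvMask_cons (b : Bool) (bs : List Bool) :
    pvMask (b :: bs) = 2 * pvMask bs + (if b then 1 else 0) := by
  simp [pvMask, List.foldl_reverse]

theorem testBit_pvMask (bits : List Bool) (i : Nat) :
    (pvMask bits).testBit i = bits.getD i false := by
  induction bits generalizing i with
  | nil => simp [pvMask]
  | cons b bs ih =>
    cases i with
    | zero =>
      rw [pvMask_cons, Nat.testBit_zero]
      cases b <;> simp
    | succ i =>
      rw [pvMask_cons, Nat.testBit_succ]
      have h2 : (2 * pvMask bs + (if b then 1 else 0)) / 2 = pvMask bs := by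
        cases b <;> simp <;> omega
      rw [h2, ih]
      simp

theorem land_eq_zero_iff (m n : Nat) :
    m &&& n = 0 ↔ ∀ i, ¬(m.testBit i = true ∧ n.testBit i = true) := by
  constructor
  · intro h i hi
    have := Nat.testBit_land m n i
    rw [h, Nat.zero_testBit, hi.1, hi.2] at this
    simp at this
  · intro h
    apply Nat.eq_of_testBit_eq
    intro i
    rw [Nat.testBit_land, Nat.zero_testBit]
    have := h i
    cases hm : m.testBit i <;> cases hn : n.testBit i <;> simp_all

theorem any_zip_iff (r1 r2 : List Bool) :
    ((r1.zip r2).any fun p => p.1 == false && p.2 == true) = true ↔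
      ∃ i, ((r1.map fun a => !a).getD i false) = true ∧ (r2.getD i false) = true := by
  induction r1 generalizing r2 with
  | nil => simp
  | cons a t ih =>
    cases r2 with
    | nil => simp
    | cons b u =>
      simp only [List.zip_cons_cons, List.any_cons, Bool.or_eq_true, ih, List.map_cons]
      constructor
      · rintro (h | ⟨i, h1, h2⟩)
        · simp only [Bool.and_eq_true, beq_iff_eq] at h
          exact ⟨0, by simp [h.1], by simp [h.2]⟩
        · exact ⟨i + 1, by simpa using h1, by simpa using h2⟩
      · rintro ⟨i, h1, h2⟩
        cases i with
        | zero =>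
          left
          simp only [List.getD_cons_zero] at h1 h2
          simp_all
        | succ i =>
          right
          exact ⟨i, by simpa using h1, by simpa using h2⟩

theorem cond_eq (r1 r2 : List Bool) :
    (pvMask r2 &&& pvMask (r1.map fun a => !a) == 0) =
      !((r1.zip r2).any fun p => p.1 == false && p.2 == true) := by
  cases hA : ((r1.zip r2).any fun p => p.1 == false && p.2 == true) with
  | false =>
    simp only [Bool.not_false, beq_iff_eq]
    rw [land_eq_zero_iff]
    intro i ⟨h1, h2⟩
    rw [testBit_pvMask] at h1 h2
    have : ((r1.zip r2).any fun p => p.1 == false && p.2 == true) = true :=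
      (any_zip_iff r1 r2).mpr ⟨i, h2, h1⟩
    rw [hA] at this
    exact Bool.false_ne_true this
  | true =>
    simp only [Bool.not_true]
    apply beq_eq_false_iff_ne.mpr
    intro h0
    obtain ⟨i, h1, h2⟩ := (any_zip_iff r1 r2).mp hA
    exact (land_eq_zero_iff _ _).mp h0 i ⟨by rwa [testBit_pvMask], by rwa [testBit_pvMask]⟩

-- ===== VERDICT (by name: the statement is the Claim_ definition above) =====
theorem cartesian_list_spec : Claim_equal_cartesian_list := by
  intro sa ng _
  unfold Spec_cartesian_list cartesian_list cartesian_list_alt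
  simp only [List.foldl_map]
  have hfun : (fun (result : List (List Bool × List Bool)) r1 =>
      ng.foldl (fun result r2 =>
        if (r1.zip r2).any (fun p => p.1 == false && p.2 == true) then result
        else result ++ [(r1, r2)]) result) =
      (fun (result : List (List Bool × List Bool)) r1 =>
      ng.foldl (fun result r2 =>
        if ((r2, pvMask r2).2 &&& pvMask (r1.map fun a => !a) == 0) then result ++ [(r1, (r2, pvMask r2).1)]
        else result) result) := by
    funext result r1
    congr 1
    funext result r2
    rw [cond_eq]
    cases hA : ((r1.zip r2).any fun p => p.1 == false && p.2 == true) <;> simp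
  rw [hfun]
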